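-- pv_equiv track=rewrite | github.com/fagemx/crawler | test_parallel_reader_optimized.py | extract_post_content
-- ===== SOURCE A (Python) =====
-- from typing import Dict, Optional, List
--
-- def extract_post_content(markdown_content: str) -> Optional[str]:
--     """提取貼文內容"""
--     lines = markdown_content.split('\n')
--     content_lines = []
--
--     for line in lines:
--         line = line.strip()
--         if not line:
--             continue
--         if line.startswith("Title:") or line.startswith("URL Source:") or line.startswith("Markdown Content:"):
--             continue
--         if "===============" in line or "---" in line:
--             break
--         if not line.startswith("[") and not line.startswith("!") and len(line) > 10:
--             content_lines.append(line)
--             if len(content_lines) >= 3: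
--                 break
--
--     return ' '.join(content_lines) if content_lines else None
-- ===== SOURCE B (Python) =====
-- from typing import Optional
--
--
-- def extract_post_content(markdown_content: str) -> Optional[str]:
--     """Two-pass version: strip once, cut at the first separator line, then filter."""
--     headers = ("Title:", "URL Source:", "Markdown Content:")
--
--     def is_cut(l: str) -> bool:
--         return bool(l) and not l.startswith(headers) and (
--             "===============" in l or "---" in l)
--
--     stripped = [l.strip() for l in markdown_content.split('\n')]
--
--     before = []
--     for l in stripped:
--         if is_cut(l):
--             break
--         before.append(l)
--
--     picked = [l for l in before
--               if l and not l.startswith(headers)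
--               and not l.startswith(('[', '!')) and len(l) > 10][:3]
--
--     return ' '.join(picked) if picked else None
-- ===== Notes on version B (the rewrite author's own statement) =====
-- stated objective: alternative
-- what changed: Replaces A's single stateful loop (skip/break/append with a running count) by a pipeline: strip all lines once, take the prefix before the first separator line, then a filter comprehension capped at 3 via slicing.
import Mathlib
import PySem

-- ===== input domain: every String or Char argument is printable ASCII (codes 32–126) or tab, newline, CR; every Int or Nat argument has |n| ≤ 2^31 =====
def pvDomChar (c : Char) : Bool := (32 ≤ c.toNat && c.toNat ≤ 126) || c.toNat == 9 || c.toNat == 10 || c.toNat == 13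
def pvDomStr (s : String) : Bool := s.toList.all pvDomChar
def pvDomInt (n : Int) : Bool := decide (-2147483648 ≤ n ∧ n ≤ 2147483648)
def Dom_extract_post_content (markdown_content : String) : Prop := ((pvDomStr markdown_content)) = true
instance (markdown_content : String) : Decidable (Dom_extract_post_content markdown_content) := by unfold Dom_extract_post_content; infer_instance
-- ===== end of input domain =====

-- B replaces A's single stateful loop by a strip-all / cut-prefix / filter-take pipeline: same values, different decomposition (no speed claim).


-- ===== PORT A =====
-- line.startswith("Title:") or line.startswith("URL Source:") or line.startswith("Markdown Content:")
def pvIsHeader (l : List Char) : Bool :=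
  PySem.Chars.startswith l "Title:".toList || PySem.Chars.startswith l "URL Source:".toList ||
    PySem.Chars.startswith l "Markdown Content:".toList

-- "===============" in line or "---" in line
def pvIsSep (l : List Char) : Bool :=
  PySem.Chars.isIn "===============".toList l || PySem.Chars.isIn "---".toList l

-- not line.startswith("[") and not line.startswith("!") and len(line) > 10
def pvIsContentShaped (l : List Char) : Bool :=
  !PySem.Chars.startswith l "[".toList && !PySem.Chars.startswith l "!".toList &&
    PySem.Chars.len l > 10

-- A's for-loop over the (raw) lines, carrying content_lines as the accumulator
def pvLoopA : List (List Char) → List (List Char) → List (List Char)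
  | [], acc => acc
  | l :: ls, acc =>
    let line := PySem.Chars.strip l
    if line = [] then pvLoopA ls acc
    else if pvIsHeader line then pvLoopA ls acc
    else if pvIsSep line then acc
    else if pvIsContentShaped line then
      let acc' := acc ++ [line]
      if 3 ≤ acc'.length then acc' else pvLoopA ls acc'
    else pvLoopA ls acc

def extract_post_content (markdown_content : String) : Option String :=
  let lines := PySem.Chars.splitOn markdown_content.toList "\n".toList
  let content_lines := pvLoopA lines []
  if content_lines = [] then none
  else some (String.ofList (PySem.Chars.join " ".toList content_lines))

-- ===== PORT B =====
-- is_cut(l): bool(l) and not l.startswith(headers) and ("===============" in l or "---" in l)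
def pvIsCut (l : List Char) : Bool :=
  !(l = []) && !pvIsHeader l && pvIsSep l

-- the filter in B's comprehension
def pvKeep (l : List Char) : Bool :=
  !(l = []) && !pvIsHeader l && pvIsContentShaped l

-- B's first pass: collect lines until the first cut line (the for/break loop)
def pvBefore : List (List Char) → List (List Char)
  | [] => []
  | l :: ls => if pvIsCut l then [] else l :: pvBefore ls

def extract_post_content_alt (markdown_content : String) : Option String :=
  let stripped := (PySem.Chars.splitOn markdown_content.toList "\n".toList).map PySem.Chars.strip
  let picked := ((pvBefore stripped).filter pvKeep).take 3
  if picked = [] then none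
  else some (String.ofList (PySem.Chars.join " ".toList picked))

-- ===== PRECONDITION & SPEC =====
def Spec_extract_post_content (markdown_content : String) (out : Option String) : Prop := out = extract_post_content_alt markdown_content
instance (markdown_content : String) (out : Option String) : Decidable (Spec_extract_post_content markdown_content out) := by unfold Spec_extract_post_content; infer_instance

-- ===== CLAIM (what is proved, stated in full; the proofs are below) =====
def Claim_equal_extract_post_content : Prop := ∀ (markdown_content : String), Dom_extract_post_content markdown_content → Spec_extract_post_content markdown_content (extract_post_content markdown_content)

-- ===== LEMMAS AND PROOFS =====

-- the loop invariant: A's loop extends acc by the filtered cut-prefix, capped at 3 - |acc|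
theorem pvLoopA_eq (ls : List (List Char)) :
    ∀ acc : List (List Char), acc.length < 3 →
      pvLoopA ls acc = acc ++ ((pvBefore (ls.map PySem.Chars.strip)).filter pvKeep).take (3 - acc.length) := by
  induction ls with
  | nil => intro acc _; simp [pvLoopA, pvBefore]
  | cons l ls ih =>
    intro acc hacc
    simp only [pvLoopA, List.map_cons, pvBefore]
    set line := PySem.Chars.strip l with hline
    by_cases h0 : line = []
    · simp [h0, pvIsCut, pvKeep, ih acc hacc]
    · simp only [h0, if_false]
      by_cases h1 : pvIsHeader line
      · simp [h1, pvIsCut, pvKeep, ih acc hacc]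
      · simp only [h1, Bool.false_eq_true, if_false]
        by_cases h2 : pvIsSep line
        · have hcut : pvIsCut line = true := by simp [pvIsCut, h0, h1, h2]
          simp [h2, hcut]
        · have hcut : pvIsCut line = false := by simp [pvIsCut, h2]
          simp only [h2, Bool.false_eq_true, if_false, hcut]
          by_cases h3 : pvIsContentShaped line
          · have hkeep : pvKeep line = true := by simp [pvKeep, h0, h1, h3]
            simp only [h3, if_true, List.filter_cons, hkeep]
            by_cases h4 : 3 ≤ (acc ++ [line]).length
            · have he : acc.length = 2 := by simp at h4; omega
              simp [he]
            · simp only [h4, if_false]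
              rw [ih (acc ++ [line]) (by simp at h4 ⊢; omega)]
              have he : 3 - acc.length = (3 - (acc.length + 1)) + 1 := by
                simp at h4; omega
              simp [he, List.take_succ_cons]
          · have hkeep : pvKeep line = false := by simp [pvKeep, h3]
            simp [h3, hkeep, ih acc hacc]

-- ===== VERDICT (by name: the statement is the Claim_ definition above) =====
theorem extract_post_content_spec : Claim_equal_extract_post_content := by
  intro md _
  unfold Spec_extract_post_content extract_post_content extract_post_content_alt
  simp only [pvLoopA_eq _ [] (by simp), List.nil_append, List.length_nil, Nat.sub_zero]
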